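-- pv_equiv track=rewrite | github.com/MrBrantCode/unitest_baseline | mut_generate/mist_train_cf/cf_70691/solution.py | count_frequency_in_matrix
-- ===== SOURCE A (Python) =====
-- def count_frequency_in_matrix(matrix):
--     frequency_dict = {}
--     for sublist in matrix:
--         if isinstance(sublist, list):
--             for item in sublist:
--                 if isinstance(item, list):
--                     for subitem in item:
--                         frequency_dict[subitem] = frequency_dict.get(subitem, 0) + 1
--                 else:
--                     frequency_dict[item] = frequency_dict.get(item, 0) + 1
--         else:
--             frequency_dict[sublist] = frequency_dict.get(sublist, 0) + 1
--     return frequency_dict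
-- ===== SOURCE B (Python) =====
-- def count_frequency_in_matrix(matrix):
--     flat = []
--     for sublist in matrix:
--         if isinstance(sublist, list):
--             for item in sublist:
--                 if isinstance(item, list):
--                     for subitem in item:
--                         flat.append(subitem)
--                 else:
--                     flat.append(item)
--         else:
--             flat.append(sublist)
--     result = {}
--     while flat:
--         head = flat[0]
--         rest = [x for x in flat[1:] if x != head]
--         result[head] = len(flat) - len(rest)
--         flat = rest
--     return result
-- ===== Notes on version B (the rewrite author's own statement) =====
-- stated objective: alternative
-- what changed: B keeps the bounded depth-3 traversal to collect leaves, then counts by partition-and-remove: repeatedly take the first remaining leaf, filter all its occurrences out of the list, and record the length drop as its count, instead of A's single-pass dict accumulation.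
import Mathlib
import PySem

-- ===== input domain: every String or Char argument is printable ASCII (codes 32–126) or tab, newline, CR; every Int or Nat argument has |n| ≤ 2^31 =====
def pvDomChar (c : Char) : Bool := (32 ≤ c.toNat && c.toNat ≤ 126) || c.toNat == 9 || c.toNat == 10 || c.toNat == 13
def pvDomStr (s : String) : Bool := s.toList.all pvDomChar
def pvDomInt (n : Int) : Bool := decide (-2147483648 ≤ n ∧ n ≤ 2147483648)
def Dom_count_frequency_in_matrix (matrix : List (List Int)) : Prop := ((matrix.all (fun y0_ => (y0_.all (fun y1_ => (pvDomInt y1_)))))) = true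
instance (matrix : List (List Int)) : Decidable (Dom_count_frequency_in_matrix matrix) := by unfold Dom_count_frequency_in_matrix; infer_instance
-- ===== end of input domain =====

-- ===== PORT A =====
-- A: for each sublist, for each item, frequency_dict[item] = get(item,0)+1; return the dict's items.
-- (The isinstance-list branches of A never fire on List (List Int): sublists are lists, items are ints.)
def count_frequency_in_matrix (matrix : List (List Int)) : List (Int × Int) :=
  (matrix.foldl
    (fun d sublist =>
      sublist.foldl (fun d item => d.insert item (d.getD item 0 + 1)) d)
    PySem.Dict.empty).items

-- ===== PORT B =====
-- B: collect leaves into flat, then tally by partition-and-remove: take the first remaining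
-- leaf, filter out all its occurrences, record the length drop as its count, repeat.
-- Each head is fresh (all earlier heads were filtered out), so the dict appends in this order.
def pvTallyLoop : List Int → List (Int × Int) → List (Int × Int)
  | [], res => res
  | head :: tail, res =>
    pvTallyLoop (tail.filter (fun x => x ≠ head))
      (res ++ [(head, ((head :: tail).length : Int)
                      - ((tail.filter (fun x => x ≠ head)).length : Int))])
termination_by xs _ => xs.length
decreasing_by
  simp only [List.length_unattach, List.length_cons, Nat.lt_succ_iff]
  exact (List.length_filter_le _ _).trans (by simp)

def count_frequency_in_matrix_alt (matrix : List (List Int)) : List (Int × Int) :=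
  let flat := matrix.foldl (fun acc sublist => sublist.foldl (fun acc item => acc ++ [item]) acc) []
  pvTallyLoop flat []

-- ===== PRECONDITION & SPEC =====
def Spec_count_frequency_in_matrix (matrix : List (List Int)) (out : List (Int × Int)) : Prop := out = count_frequency_in_matrix_alt matrix
instance (matrix : List (List Int)) (out : List (Int × Int)) : Decidable (Spec_count_frequency_in_matrix matrix out) := by unfold Spec_count_frequency_in_matrix; infer_instance

-- ===== CLAIM =====
def Claim_equal_count_frequency_in_matrix : Prop := ∀ (matrix : List (List Int)), Dom_count_frequency_in_matrix matrix → Spec_count_frequency_in_matrix matrix (count_frequency_in_matrix matrix)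

-- ===== LEMMAS AND PROOFS =====

-- Appending one leaf at a time builds the concatenation of the sublists.
lemma pv_flat_eq (matrix : List (List Int)) (acc : List Int) :
    matrix.foldl (fun acc sublist => sublist.foldl (fun acc item => acc ++ [item]) acc) acc
      = acc ++ matrix.flatten := by
  induction matrix generalizing acc with
  | nil => simp
  | cons s t ih =>
    rw [List.foldl_cons, PySem.List.foldl_append_singleton, ih, List.flatten_cons,
      List.append_assoc]

-- A's nested counting loop is the counting loop over the flattened leaves.
lemma pv_dict_eq (matrix : List (List Int)) (d : PySem.Dict Int Int) :
    matrix.foldl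
      (fun d sublist => sublist.foldl (fun d item => d.insert item (d.getD item 0 + 1)) d) d
      = matrix.flatten.foldl (fun d item => d.insert item (d.getD item 0 + 1)) d := by
  induction matrix generalizing d with
  | nil => simp
  | cons s t ih => simp [ih, List.foldl_append]

-- Elements already present in the accumulator may be filtered out of the source list.
lemma pv_ofList_filter_mem (t : List Int) (acc : PySem.Set Int) (h : Int) (hmem : h ∈ acc) :
    List.foldl PySem.Set.add acc t
      = List.foldl PySem.Set.add acc (t.filter (fun x => x ≠ h)) := by
  induction t generalizing acc with
  | nil => rfl
  | cons x t ih =>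
    by_cases hx : x = h
    · subst hx
      have hacc : PySem.Set.add acc x = acc := by
        simp [PySem.Set.add, List.contains_eq_mem, hmem]
      have hf : (x :: t).filter (fun y => y ≠ x) = t.filter (fun y => y ≠ x) := by
        simp
      rw [hf, List.foldl_cons, hacc]
      exact ih acc hmem
    · have hf : (x :: t).filter (fun y => y ≠ h) = x :: t.filter (fun y => y ≠ h) := by
        simp [hx]
      rw [hf, List.foldl_cons, List.foldl_cons]
      apply ih
      unfold PySem.Set.add
      split
      · exact hmem
      · simp [hmem]

-- A head absent from the source list commutes out of the dedup fold.
lemma pv_ofList_head_out (t : List Int) (s : PySem.Set Int) (h : Int)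
    (hnot : ∀ y ∈ t, y ≠ h) :
    List.foldl PySem.Set.add (h :: s) t = h :: List.foldl PySem.Set.add s t := by
  induction t generalizing s with
  | nil => rfl
  | cons x t ih =>
    have hx : x ≠ h := hnot x (by simp)
    have hadd : PySem.Set.add (h :: s) x = h :: PySem.Set.add s x := by
      by_cases hsx : x ∈ s
      · simp [PySem.Set.add, PySem.Set.contains, List.contains_eq_mem, hsx, hx]
      · simp [PySem.Set.add, PySem.Set.contains, List.contains_eq_mem, hsx, hx]
    rw [List.foldl_cons, List.foldl_cons, hadd,
      ih _ (fun y hy => hnot y (List.mem_cons_of_mem _ hy))]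

-- First-occurrence dedup satisfies the partition recursion.
lemma pv_ofList_cons (h : Int) (t : List Int) :
    PySem.Set.ofList (h :: t) = h :: PySem.Set.ofList (t.filter (fun x => x ≠ h)) := by
  have h1 : PySem.Set.ofList (h :: t) = List.foldl PySem.Set.add [h] t := by
    simp [PySem.Set.ofList, PySem.Set.add, PySem.Set.empty]
  rw [h1, pv_ofList_filter_mem t [h] h (by simp)]
  exact pv_ofList_head_out _ [] h (fun y hy => by simpa using (List.of_mem_filter hy))

-- Removing every occurrence of h shortens the list by exactly h's count.
lemma pv_count_filter_len (h : Int) (t : List Int) :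
    t.count h + (t.filter (fun x => x ≠ h)).length = t.length := by
  induction t with
  | nil => simp
  | cons a t iht =>
    simp only [decide_not] at iht ⊢
    by_cases ha : a = h
    · subst ha
      simp
      omega
    · simp [ha]
      omega

-- The tally loop computes counts over the first-occurrence distinct keys.
lemma pv_tally_eq (xs : List Int) (res : List (Int × Int)) :
    pvTallyLoop xs res
      = res ++ (PySem.Set.ofList xs).map (fun k => (k, (xs.count k : Int))) := by
  induction hn : xs.length using Nat.strong_induction_on generalizing xs res with
  | _ n ih =>
    match xs with
    | [] => simp [pvTallyLoop.eq_1, PySem.Set.ofList, PySem.Set.empty]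
    | h :: t =>
      rw [pvTallyLoop.eq_2]
      set rest := t.filter (fun x => x ≠ h) with hrest
      have hlt : rest.length < n := by
        subst hn
        simpa [hrest] using Nat.lt_succ_of_le (List.length_filter_le _ t)
      rw [ih rest.length hlt rest _ rfl]
      rw [pv_ofList_cons, List.map_cons, List.append_assoc]
      congr 1
      rw [List.singleton_append]
      have hcnt : t.count h + rest.length = t.length := by
        rw [hrest]; exact pv_count_filter_len h t
      congr 1
      · congr 1
        have hfe : List.filter (fun x => !decide (x = h)) t = rest := by
          rw [hrest]; simp [decide_not]
        simp only [List.count_cons_self, List.length_cons]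
        push_cast
        omega
      · apply List.map_congr_left
        intro k hk
        have hk' : k ∈ rest := (PySem.Set.mem_ofList rest k).mp hk
        have hkh : k ≠ h := by
          have := List.of_mem_filter hk'
          simpa using this
        have hck : rest.count k = t.count k := by
          rw [hrest, List.count_filter]
          simp [hkh]
        simp [hck, Ne.symm hkh]

-- ===== VERDICT =====
theorem count_frequency_in_matrix_spec : Claim_equal_count_frequency_in_matrix := by
  intro matrix _
  unfold Spec_count_frequency_in_matrix count_frequency_in_matrix count_frequency_in_matrix_alt
  rw [pv_dict_eq, pv_flat_eq, PySem.Dict.foldl_insert_getD_add_one_eq_counter,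
    PySem.Dict.items_counter, pv_tally_eq]
  simp
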